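-- pv_equiv track=rewrite | github.com/pioneerman2k1/AOL7-Retro-Server | aol_server_0.2.148.py | find_handshake_seed
-- ===== SOURCE A (Python) =====
-- def find_handshake_seed(payload, seq, target_crc):
--     for seed_candidate in range(0xFFFF + 1):
--         crc = seed_candidate
--         byte_val = seq
--         for _ in range(8):
--             bit = (byte_val ^ crc) & 1
--             crc >>= 1
--             if bit: crc ^= 0x8408
--             byte_val >>= 1
--         for byte in payload:
--             byte_val = byte
--             for _ in range(8):
--                 bit = (byte_val ^ crc) & 1
--                 crc >>= 1
--                 if bit: crc ^= 0x8408
--                 byte_val >>= 1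
--         if (crc & 0xFFFF) == target_crc: return seed_candidate
--     return None
-- ===== SOURCE B (Python) =====
-- def find_handshake_seed(payload, seq, target_crc):
--     # Run the CRC-16/KERMIT bit steps backwards from the target: each bit step is
--     # invertible, so the unique seed is recovered in O(len(payload)) instead of
--     # brute-forcing all 65536 candidates.
--     if not (0 <= target_crc <= 0xFFFF):
--         return None
--     crc = target_crc
--     for byte in reversed(payload):
--         for k in range(7, -1, -1):
--             bit = crc >> 15
--             crc = ((crc ^ (0x8408 if bit else 0)) << 1) | (bit ^ ((byte >> k) & 1))
--     for k in range(7, -1, -1):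
--         bit = crc >> 15
--         crc = ((crc ^ (0x8408 if bit else 0)) << 1) | (bit ^ ((seq >> k) & 1))
--     return crc
-- ===== Notes on version B (the rewrite author's own statement) =====
-- stated objective: faster
-- what changed: A brute-forces all 65536 seed candidates, running the full CRC over seq and payload for each; B runs the invertible CRC-16 bit steps backwards from the target checksum through the payload (reversed) and seq, recovering the unique matching seed directly, and returns None exactly when the target is outside 0..0xFFFF.
import Mathlib
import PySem

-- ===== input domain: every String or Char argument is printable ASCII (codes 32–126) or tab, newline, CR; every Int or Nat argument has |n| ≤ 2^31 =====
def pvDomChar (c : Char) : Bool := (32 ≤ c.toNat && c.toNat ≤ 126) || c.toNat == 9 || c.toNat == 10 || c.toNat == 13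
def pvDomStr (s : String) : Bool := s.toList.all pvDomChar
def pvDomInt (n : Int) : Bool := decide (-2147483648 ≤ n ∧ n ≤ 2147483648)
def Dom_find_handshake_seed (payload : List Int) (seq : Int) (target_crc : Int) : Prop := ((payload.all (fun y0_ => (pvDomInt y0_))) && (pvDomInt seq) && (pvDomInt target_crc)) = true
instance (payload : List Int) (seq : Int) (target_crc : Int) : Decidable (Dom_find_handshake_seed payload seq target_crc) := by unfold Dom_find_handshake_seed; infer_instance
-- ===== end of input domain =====

-- B replaces A's brute force over all 65536 seeds by running the invertible CRC bit
-- steps backwards from the target (O(len(payload)) instead of O(65536·len(payload))).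

-- ===== PORT A =====
-- one iteration of A's inner 8-step bit loop on the state (crc, byte_val)
def pvAStep (st : Int × Int) : Int × Int :=
  let bit := PySem.Int.band (PySem.Int.bxor st.2 st.1) 1
  let crc := st.1 >>> (1 : Nat)
  let crc := if bit ≠ 0 then PySem.Int.bxor crc 33800 else crc
  (crc, st.2 >>> (1 : Nat))

-- A's 8-round byte loop ('for _ in range(8)')
def pvAByte (crc : Int) (b : Int) : Int :=
  ((List.range 8).foldl (fun st _ => pvAStep st) (crc, b)).1

def find_handshake_seed (payload : List Int) (seq : Int) (target_crc : Int) : Option Int :=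
  (PySem.List.pyRange 0 65536 1).find? (fun seed =>
    PySem.Int.band (payload.foldl pvAByte (pvAByte seed seq)) 65535 == target_crc)

-- ===== PORT B =====
-- one backwards bit step of B (undoes one forward CRC bit step; k is the bit index)
def pvBStep (b : Int) (crc : Int) (k : Int) : Int :=
  let bit := crc >>> (15 : Nat)
  PySem.Int.bor ((PySem.Int.bxor crc (if bit ≠ 0 then 33800 else 0)) <<< (1 : Nat))
                (PySem.Int.bxor bit (PySem.Int.band (b >>> k.toNat) 1))

-- B's 'for k in range(7, -1, -1)' byte loop
def pvBByte (crc : Int) (b : Int) : Int :=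
  (PySem.List.pyRange 7 (-1) (-1)).foldl (pvBStep b) crc

def find_handshake_seed_alt (payload : List Int) (seq : Int) (target_crc : Int) : Option Int :=
  if 0 ≤ target_crc ∧ target_crc ≤ 65535 then
    some (pvBByte (payload.reverse.foldl pvBByte target_crc) seq)
  else none

-- ===== PRECONDITION & SPEC =====
def Spec_find_handshake_seed (payload : List Int) (seq : Int) (target_crc : Int) (out : Option Int) : Prop := out = find_handshake_seed_alt payload seq target_crc
instance (payload : List Int) (seq : Int) (target_crc : Int) (out : Option Int) : Decidable (Spec_find_handshake_seed payload seq target_crc out) := by unfold Spec_find_handshake_seed; infer_instance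

-- ===== CLAIM (what is proved, stated in full; the proofs are below) =====
def Claim_equal_find_handshake_seed : Prop := ∀ (payload : List Int) (seq : Int) (target_crc : Int), Dom_find_handshake_seed payload seq target_crc → Spec_find_handshake_seed payload seq target_crc (find_handshake_seed payload seq target_crc)

-- ===== LEMMAS AND PROOFS =====

-- Nat model of one forward CRC bit step (input bit i)
def pvFbit (c : Nat) (i : Bool) : Nat :=
  if (decide (c % 2 = 1)) != i then (c / 2) ^^^ 33800 else c / 2

-- Nat model of one backwards CRC bit step
def pvIbit (c : Nat) (i : Bool) : Nat :=
  if 32768 ≤ c then 2 * (c ^^^ 33800) + (if i then 0 else 1)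
  else 2 * c + (if i then 1 else 0)

-- the low n input bits of the Python integer b, LSB first
def pvBits (b : Int) (n : Nat) : List Bool :=
  (List.range n).map (fun k => decide ((b >>> (k : Nat)) % 2 = 1))

def pvF (c : Nat) (bs : List Bool) : Nat := bs.foldl pvFbit c
def pvG (c : Nat) (bs : List Bool) : Nat := bs.foldr (fun i c => pvIbit c i) c

def pvFb (c : Nat) (b : Int) : Nat := pvF c (pvBits b 8)
def pvGb (c : Nat) (b : Int) : Nat := pvG c (pvBits b 8)

theorem pvFbit_lt (c : Nat) (i : Bool) (hc : c < 65536) : pvFbit c i < 65536 := by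
  unfold pvFbit
  have h1 : c / 2 < 2^16 := by omega
  have h2 : (33800 : Nat) < 2^16 := by norm_num
  have := Nat.xor_lt_two_pow h1 h2
  split <;> omega

theorem pvXorHighLow (c : Nat) (hc : c < 65536) (hge : 32768 ≤ c) : c ^^^ 33800 < 32768 := by
  have hb : ∀ j ≥ 15, (c ^^^ 33800).testBit j = false := by
    intro j hj
    rcases Nat.eq_or_lt_of_le hj with h | h
    · subst h
      have hc15 : c.testBit 15 = true := by
        rw [Nat.testBit_eq_decide_div_mod_eq]
        simp only [decide_eq_true_eq]
        norm_num
        omega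
      have hm15 : (33800 : Nat).testBit 15 = true := by decide
      simp [Nat.testBit_xor, hc15, hm15]
    · have hcj : c.testBit j = false := Nat.testBit_lt_two_pow (by calc c < 65536 := hc
        _ = 2^16 := by norm_num
        _ ≤ 2^j := Nat.pow_le_pow_right (by norm_num) (by omega))
      have hmj : (33800 : Nat).testBit j = false := Nat.testBit_lt_two_pow (by
        calc (33800:Nat) < 65536 := by norm_num
          _ = 2^16 := by norm_num
          _ ≤ 2^j := Nat.pow_le_pow_right (by norm_num) (by omega))
      simp [Nat.testBit_xor, hcj, hmj]
  have := Nat.lt_pow_two_of_testBit (n := 15) (c ^^^ 33800) hb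
  norm_num at this; omega

theorem pvXorLowHigh (q : Nat) (hq : q < 32768) : 32768 ≤ q ^^^ 33800 := by
  have hq15 : q.testBit 15 = false := Nat.testBit_lt_two_pow (by norm_num; omega)
  have hm15 : (33800 : Nat).testBit 15 = true := by decide
  have : (q ^^^ 33800).testBit 15 = true := by simp [Nat.testBit_xor, hq15, hm15]
  have := Nat.ge_two_pow_of_testBit this
  norm_num at this; omega

theorem pvIbit_lt (c : Nat) (i : Bool) (hc : c < 65536) : pvIbit c i < 65536 := by
  unfold pvIbit
  split
  · have := pvXorHighLow c hc (by assumption); split <;> omega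
  · split <;> omega

theorem pvIbit_pvFbit (c : Nat) (i : Bool) (hc : c < 65536) : pvIbit (pvFbit c i) i = c := by
  have hq : c / 2 < 32768 := by omega
  cases i with
  | false =>
      by_cases hr : c % 2 = 1
      · have hf : pvFbit c false = (c / 2) ^^^ 33800 := by simp [pvFbit, hr]
        have hge := pvXorLowHigh (c / 2) hq
        rw [hf]
        simp only [pvIbit, if_pos hge, Nat.xor_xor_cancel_right]
        simp
        omega
      · have hf : pvFbit c false = c / 2 := by simp [pvFbit, hr]
        rw [hf]
        simp only [pvIbit, if_neg (by omega : ¬ 32768 ≤ c / 2)]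
        simp
        omega
  | true =>
      by_cases hr : c % 2 = 1
      · have hf : pvFbit c true = c / 2 := by simp [pvFbit, hr]
        rw [hf]
        simp only [pvIbit, if_neg (by omega : ¬ 32768 ≤ c / 2)]
        simp
        omega
      · have hf : pvFbit c true = (c / 2) ^^^ 33800 := by simp [pvFbit, hr]
        have hge := pvXorLowHigh (c / 2) hq
        rw [hf]
        simp only [pvIbit, if_pos hge, Nat.xor_xor_cancel_right]
        simp
        omega

theorem pvFbit_pvIbit (c : Nat) (i : Bool) (hc : c < 65536) : pvFbit (pvIbit c i) i = c := by
  by_cases hb : 32768 ≤ c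
  · have hx : c ^^^ 33800 < 32768 := pvXorHighLow c hc hb
    cases i with
    | false =>
        have hi : pvIbit c false = 2 * (c ^^^ 33800) + 1 := by simp [pvIbit, hb]
        have h2 : (2 * (c ^^^ 33800) + 1) % 2 = 1 := by omega
        have hdiv : (2 * (c ^^^ 33800) + 1) / 2 = c ^^^ 33800 := by omega
        rw [hi]
        simp [pvFbit, h2, hdiv, Nat.xor_xor_cancel_right]
    | true =>
        have hi : pvIbit c true = 2 * (c ^^^ 33800) := by simp [pvIbit, hb]
        have h2 : (2 * (c ^^^ 33800)) % 2 = 0 := by omega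
        have hdiv : (2 * (c ^^^ 33800)) / 2 = c ^^^ 33800 := by omega
        rw [hi]
        simp [pvFbit, h2, hdiv, Nat.xor_xor_cancel_right]
  · cases i with
    | false =>
        have hi : pvIbit c false = 2 * c := by simp [pvIbit, hb]
        have h2 : (2 * c) % 2 = 0 := by omega
        have hdiv : (2 * c) / 2 = c := by omega
        rw [hi]
        simp [pvFbit, h2, hdiv]
    | true =>
        have hi : pvIbit c true = 2 * c + 1 := by simp [pvIbit, hb]
        have h2 : (2 * c + 1) % 2 = 1 := by omega
        have hdiv : (2 * c + 1) / 2 = c := by omega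
        rw [hi]
        simp [pvFbit, h2, hdiv]

theorem pvF_lt (bs : List Bool) (c : Nat) (hc : c < 65536) : pvF c bs < 65536 := by
  induction bs generalizing c with
  | nil => simpa [pvF]
  | cons x xs ih => simpa [pvF, List.foldl_cons] using ih _ (pvFbit_lt c x hc)

theorem pvG_lt (bs : List Bool) (c : Nat) (hc : c < 65536) : pvG c bs < 65536 := by
  induction bs generalizing c with
  | nil => simpa [pvG]
  | cons x xs ih => simpa [pvG, List.foldr_cons] using pvIbit_lt _ x (ih _ hc)

theorem pvG_pvF (bs : List Bool) (c : Nat) (hc : c < 65536) : pvG (pvF c bs) bs = c := by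
  induction bs generalizing c with
  | nil => simp [pvF, pvG]
  | cons x xs ih =>
      simp only [pvF, pvG, List.foldl_cons, List.foldr_cons] at *
      rw [ih _ (pvFbit_lt c x hc), pvIbit_pvFbit c x hc]

theorem pvF_pvG (bs : List Bool) (c : Nat) (hc : c < 65536) : pvF (pvG c bs) bs = c := by
  induction bs generalizing c with
  | nil => simp [pvF, pvG]
  | cons x xs ih =>
      simp only [pvF, pvG, List.foldl_cons, List.foldr_cons] at *
      rw [pvFbit_pvIbit (List.foldr (fun i c => pvIbit c i) c xs) x
            (by simpa [pvG] using pvG_lt xs c hc), ih _ hc]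

-- parity of Python xor
theorem pvNatXorParity (x y : Nat) : (x ^^^ y) % 2 = if x % 2 = y % 2 then 0 else 1 := by
  have h := Nat.testBit_xor x y 0
  simp only [Nat.testBit_eq_decide_div_mod_eq, pow_zero, Nat.div_one] at h
  rcases Nat.mod_two_eq_zero_or_one x with hx | hx <;>
    rcases Nat.mod_two_eq_zero_or_one y with hy | hy <;>
      rcases Nat.mod_two_eq_zero_or_one (x ^^^ y) with hz | hz <;>
        simp [hx, hy, hz] at h ⊢

theorem pvBxorParity (a b : Int) :
    (PySem.Int.bxor a b) % 2 = if a % 2 = b % 2 then 0 else 1 := by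
  unfold PySem.Int.bxor
  by_cases ha : 0 ≤ a <;> by_cases hb : 0 ≤ b <;>
    simp only [ha, hb, if_true, if_false]
  · have hp := pvNatXorParity a.toNat b.toNat
    split_ifs at hp ⊢ <;> omega
  · have hp := pvNatXorParity a.toNat (-b - 1).toNat
    split_ifs at hp ⊢ <;> omega
  · have hp := pvNatXorParity (-a - 1).toNat b.toNat
    split_ifs at hp ⊢ <;> omega
  · have hp := pvNatXorParity (-a - 1).toNat (-b - 1).toNat
    split_ifs at hp ⊢ <;> omega

theorem pvStepA (c : Nat) (hc : c < 65536) (bv : Int) :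
    pvAStep ((c : Int), bv) = (((pvFbit c (decide (bv % 2 = 1)) : Nat) : Int), bv >>> (1 : Nat)) := by
  have hbit : PySem.Int.band (PySem.Int.bxor bv (c : Int)) 1
      = if bv % 2 = (c : Int) % 2 then 0 else 1 := by
    rw [PySem.Int.band_one, PySem.Int.mod_eq_emod_of_pos (by norm_num), pvBxorParity]
  have hshift : ((c : Int)) >>> (1 : Nat) = ((c / 2 : Nat) : Int) := by
    rw [Int.shiftRight_eq_div_pow]
    push_cast
    norm_num
  have hxor : PySem.Int.bxor ((c / 2 : Nat) : Int) 33800 = ((c / 2 ^^^ 33800 : Nat) : Int) := by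
    rw [PySem.Int.bxor_of_nonneg (Int.natCast_nonneg _) (by norm_num)]
    simp only [Int.toNat_natCast, show ((33800 : Int)).toNat = 33800 from rfl]
  simp only [pvAStep, hbit, hshift]
  by_cases hpar : bv % 2 = (c : Int) % 2
  · have hcond : (decide (c % 2 = 1) != decide (bv % 2 = 1)) = false := by
      simp only [bne_eq_false_iff_eq, decide_eq_decide]
      omega
    rw [if_pos hpar, if_neg (by norm_num : ¬ ((0 : Int) ≠ 0))]
    simp [pvFbit, hcond]
  · have hcond : (decide (c % 2 = 1) != decide (bv % 2 = 1)) = true := by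
      simp only [bne_iff_ne, ne_eq, decide_eq_decide]
      omega
    rw [if_neg hpar, if_pos (by norm_num : ((1 : Int) ≠ 0)), hxor]
    simp [pvFbit, hcond]

theorem pvLoopA (n : Nat) (c : Nat) (hc : c < 65536) (bv : Int) :
    (List.range n).foldl (fun st _ => pvAStep st) ((c : Int), bv)
      = (((pvF c (pvBits bv n) : Nat) : Int), bv >>> (n : Nat)) := by
  induction n with
  | zero => simp [pvBits, pvF]
  | succ n ih =>
      rw [List.range_succ, List.foldl_append]
      simp only [List.foldl_cons, List.foldl_nil]
      rw [ih, pvStepA (pvF c (pvBits bv n)) (pvF_lt _ _ hc) (bv >>> (n : Nat))]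
      have hbits : pvBits bv (n + 1)
          = pvBits bv n ++ [decide ((bv >>> (n : Nat)) % 2 = 1)] := by
        simp [pvBits, List.range_succ]
      have hF : pvF c (pvBits bv (n + 1))
          = pvFbit (pvF c (pvBits bv n)) (decide ((bv >>> (n : Nat)) % 2 = 1)) := by
        rw [hbits]; simp [pvF, List.foldl_append]
      rw [hF, ← Int.shiftRight_add]

theorem pvAByte_eq (c : Nat) (hc : c < 65536) (b : Int) :
    pvAByte (c : Int) b = ((pvFb c b : Nat) : Int) := by
  simp [pvAByte, pvLoopA 8 c hc b, pvFb]

theorem pvOrOne (m : Nat) : 2 * m ||| 1 = 2 * m + 1 := by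
  have hd : (2 * m ||| 1) / 2 = (2 * m) / 2 ||| 1 / 2 := Nat.or_div_two
  have hm : (2 * m ||| 1) % 2 = 1 := by
    have := Nat.or_mod_two_eq_one (a := 2 * m) (b := 1)
    omega
  simp only [Nat.reduceDiv, Nat.or_zero] at hd
  rw [Nat.mul_div_cancel_left _ (by norm_num)] at hd
  omega

theorem pvStepB (c : Nat) (hc : c < 65536) (b : Int) (k : Nat) :
    pvBStep b (c : Int) (k : Int) = ((pvIbit c (decide ((b >>> (k : Nat)) % 2 = 1)) : Nat) : Int) := by
  have hbit : ((c : Int)) >>> (15 : Nat) = ((c / 32768 : Nat) : Int) := by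
    rw [Int.shiftRight_eq_div_pow]
    push_cast
    norm_num
  have hin : PySem.Int.band (b >>> (k : Nat)) 1 = (b >>> (k : Nat)) % 2 := by
    rw [PySem.Int.band_one, PySem.Int.mod_eq_emod_of_pos (by norm_num)]
  have hin01 : (b >>> (k : Nat)) % 2 = 0 ∨ (b >>> (k : Nat)) % 2 = 1 := by omega
  have hor : ∀ m : Nat, ∀ r : Int, r = 0 ∨ r = 1 →
      PySem.Int.bor ((2 * m : Nat) : Int) r = ((2 * m + r.toNat : Nat) : Int) := by
    intro m r hr
    rcases hr with h | h <;> subst h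
    · simp [PySem.Int.bor_zero]
    · rw [show (1 : Int) = ((1 : Nat) : Int) from rfl, PySem.Int.bor_natCast, pvOrOne]
      norm_num
  simp only [pvBStep, Int.toNat_natCast, hbit, hin]
  by_cases hb15 : 32768 ≤ c
  · have h1 : c / 32768 = 1 := by omega
    rw [h1]
    rw [if_pos (by norm_num : ((1 : Nat) : Int) ≠ 0)]
    have hxor : PySem.Int.bxor (c : Int) 33800 = ((c ^^^ 33800 : Nat) : Int) := by
      rw [PySem.Int.bxor_of_nonneg (Int.natCast_nonneg _) (by norm_num)]
      simp only [Int.toNat_natCast, show ((33800 : Int)).toNat = 33800 from rfl]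
    have hshl : (((c ^^^ 33800 : Nat) : Int)) <<< (1 : Nat)
        = ((2 * (c ^^^ 33800) : Nat) : Int) := by
      rw [← Int.natCast_shiftLeft]
      norm_num [Nat.shiftLeft_eq, Nat.mul_comm]
    rw [hxor, hshl]
    rcases hin01 with h0 | h0
    · have hx : PySem.Int.bxor ((1 : Nat) : Int) ((b >>> (k : Nat)) % 2) = 1 := by rw [h0]; decide
      rw [hx, hor _ 1 (Or.inr rfl)]
      have : (decide ((b >>> (k : Nat)) % 2 = 1)) = false := by simp [h0]
      simp [pvIbit, hb15, this]
    · have hx : PySem.Int.bxor ((1 : Nat) : Int) ((b >>> (k : Nat)) % 2) = 0 := by rw [h0]; decide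
      rw [hx, hor _ 0 (Or.inl rfl)]
      have : (decide ((b >>> (k : Nat)) % 2 = 1)) = true := by simp [h0]
      simp [pvIbit, hb15, this]
  · have h1 : c / 32768 = 0 := by omega
    rw [h1]
    rw [if_neg (by norm_num : ¬ ((0 : Nat) : Int) ≠ 0)]
    have hxor : PySem.Int.bxor (c : Int) 0 = (c : Int) := PySem.Int.bxor_zero _
    have hshl : ((c : Int)) <<< (1 : Nat) = ((2 * c : Nat) : Int) := by
      rw [show ((c : Int)) <<< (1 : Nat) = (((c : Nat) : Int)) <<< (1 : Nat) from rfl,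
        ← Int.natCast_shiftLeft]
      norm_num [Nat.shiftLeft_eq, Nat.mul_comm]
    rw [hxor, hshl]
    rcases hin01 with h0 | h0
    · have hx : PySem.Int.bxor ((0 : Nat) : Int) ((b >>> (k : Nat)) % 2) = 0 := by rw [h0]; decide
      rw [hx, hor _ 0 (Or.inl rfl)]
      have : (decide ((b >>> (k : Nat)) % 2 = 1)) = false := by simp [h0]
      simp [pvIbit, hb15, this]
    · have hx : PySem.Int.bxor ((0 : Nat) : Int) ((b >>> (k : Nat)) % 2) = 1 := by rw [h0]; decide
      rw [hx, hor _ 1 (Or.inr rfl)]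
      have : (decide ((b >>> (k : Nat)) % 2 = 1)) = true := by simp [h0]
      simp [pvIbit, hb15, this]

theorem pvLoopB (n : Nat) (c : Nat) (hc : c < 65536) (b : Int) :
    ((List.range n).reverse.map (fun k : Nat => (k : Int))).foldl (pvBStep b) (c : Int)
      = ((pvG c (pvBits b n) : Nat) : Int) := by
  induction n generalizing c with
  | zero => simp [pvBits, pvG]
  | succ n ih =>
      have hlist : (List.range (n + 1)).reverse.map (fun k : Nat => (k : Int))
          = ((n : Nat) : Int) :: (List.range n).reverse.map (fun k : Nat => (k : Int)) := by
        simp [List.range_succ]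
      rw [hlist]
      simp only [List.foldl_cons]
      rw [pvStepB c hc b n, ih _ (pvIbit_lt c _ hc)]
      have hbits : pvBits b (n + 1) = pvBits b n ++ [decide ((b >>> (n : Nat)) % 2 = 1)] := by
        simp [pvBits, List.range_succ]
      have hG : pvG c (pvBits b (n + 1))
          = pvG (pvIbit c (decide ((b >>> (n : Nat)) % 2 = 1))) (pvBits b n) := by
        rw [hbits]; simp [pvG, List.foldr_append]
      rw [hG]

theorem pvBByte_eq (c : Nat) (hc : c < 65536) (b : Int) :
    pvBByte (c : Int) b = ((pvGb c b : Nat) : Int) := by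
  have h : PySem.List.pyRange 7 (-1) (-1) = (List.range 8).reverse.map (fun k : Nat => (k : Int)) := by decide
  simp only [pvBByte, h, pvLoopB 8 c hc b, pvGb]

theorem pvFb_lt (c : Nat) (b : Int) (hc : c < 65536) : pvFb c b < 65536 := pvF_lt _ c hc
theorem pvGb_lt (c : Nat) (b : Int) (hc : c < 65536) : pvGb c b < 65536 := pvG_lt _ c hc
theorem pvGb_pvFb (c : Nat) (b : Int) (hc : c < 65536) : pvGb (pvFb c b) b = c := pvG_pvF _ c hc
theorem pvFb_pvGb (c : Nat) (b : Int) (hc : c < 65536) : pvFb (pvGb c b) b = c := pvF_pvG _ c hc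

theorem pvFoldF_lt (l : List Int) (c : Nat) (hc : c < 65536) : l.foldl pvFb c < 65536 := by
  induction l generalizing c with
  | nil => simpa
  | cons x xs ih => simpa using ih _ (pvFb_lt c x hc)

theorem pvFoldG_lt (l : List Int) (c : Nat) (hc : c < 65536) : l.foldl pvGb c < 65536 := by
  induction l generalizing c with
  | nil => simpa
  | cons x xs ih => simpa using ih _ (pvGb_lt c x hc)

theorem pvFoldA_eq (l : List Int) (c : Nat) (hc : c < 65536) :
    l.foldl pvAByte (c : Int) = ((l.foldl pvFb c : Nat) : Int) := by
  induction l generalizing c with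
  | nil => simp
  | cons x xs ih =>
      simp only [List.foldl_cons, pvAByte_eq c hc x]
      exact ih _ (pvFb_lt c x hc)

theorem pvFoldB_eq (l : List Int) (c : Nat) (hc : c < 65536) :
    l.foldl pvBByte (c : Int) = ((l.foldl pvGb c : Nat) : Int) := by
  induction l generalizing c with
  | nil => simp
  | cons x xs ih =>
      simp only [List.foldl_cons, pvBByte_eq c hc x]
      exact ih _ (pvGb_lt c x hc)

theorem pvListG_F (l : List Int) (c : Nat) (hc : c < 65536) :
    l.reverse.foldl pvGb (l.foldl pvFb c) = c := by
  induction l generalizing c with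
  | nil => simp
  | cons x xs ih =>
      simp only [List.foldl_cons, List.reverse_cons, List.foldl_append, List.foldl_cons, List.foldl_nil]
      rw [ih _ (pvFb_lt c x hc), pvGb_pvFb c x hc]

theorem pvListF_G (l : List Int) (t : Nat) (ht : t < 65536) :
    l.foldl pvFb (l.reverse.foldl pvGb t) = t := by
  induction l generalizing t with
  | nil => simp
  | cons x xs ih =>
      simp only [List.foldl_cons, List.reverse_cons, List.foldl_append, List.foldl_cons, List.foldl_nil]
      rw [pvFb_pvGb _ x (pvFoldG_lt _ t ht), ih _ ht]

-- full forward map (A's crc for a given 16-bit seed) and its inverse (what B computes)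
def pvFF (payload : List Int) (seq : Int) (s : Nat) : Nat := payload.foldl pvFb (pvFb s seq)
def pvGG (payload : List Int) (seq : Int) (t : Nat) : Nat := pvGb (payload.reverse.foldl pvGb t) seq

theorem pvFF_lt (payload : List Int) (seq : Int) (s : Nat) (hs : s < 65536) :
    pvFF payload seq s < 65536 := pvFoldF_lt _ _ (pvFb_lt s seq hs)

theorem pvGG_lt (payload : List Int) (seq : Int) (t : Nat) (ht : t < 65536) :
    pvGG payload seq t < 65536 := pvGb_lt _ seq (pvFoldG_lt _ t ht)

theorem pvFF_pvGG (payload : List Int) (seq : Int) (t : Nat) (ht : t < 65536) :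
    pvFF payload seq (pvGG payload seq t) = t := by
  unfold pvFF pvGG
  rw [pvFb_pvGb _ seq (pvFoldG_lt _ t ht)]
  exact pvListF_G payload t ht

theorem pvGG_pvFF (payload : List Int) (seq : Int) (s : Nat) (hs : s < 65536) :
    pvGG payload seq (pvFF payload seq s) = s := by
  unfold pvFF pvGG
  rw [pvListG_F payload _ (pvFb_lt s seq hs)]
  exact pvGb_pvFb s seq hs

theorem pvFindUnique (l : List Int) (p : Int → Bool) (w : Int) (hw : w ∈ l)
    (hpw : p w = true) (huniq : ∀ x ∈ l, p x = true → x = w) : l.find? p = some w := by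
  induction l with
  | nil => cases hw
  | cons a as ih =>
      by_cases ha : p a = true
      · have haw : a = w := huniq a (List.mem_cons_self) ha
        cases haw
        simp [List.find?, ha]
      · have hwas : w ∈ as := by
          rcases List.mem_cons.mp hw with h | h
          · exact absurd (h ▸ hpw) ha
          · exact h
        simp only [List.find?, Bool.eq_false_iff.mpr ha]
        simpa [ha] using ih hwas (fun x hx hp => huniq x (List.mem_cons_of_mem _ hx) hp)

theorem pvPredChar (payload : List Int) (seq : Int) (target_crc : Int) (s : Nat) (hs : s < 65536) :
    (PySem.Int.band (payload.foldl pvAByte (pvAByte ((s : Nat) : Int) seq)) 65535 == target_crc)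
      = decide (((pvFF payload seq s : Nat) : Int) = target_crc) := by
  rw [pvAByte_eq s hs seq, pvFoldA_eq payload _ (pvFb_lt s seq hs)]
  have hlt : pvFF payload seq s < 65536 := pvFF_lt payload seq s hs
  have hand : (pvFF payload seq s) &&& 65535 = pvFF payload seq s := by
    have := Nat.and_two_pow_sub_one_of_lt_two_pow (n := 16) (x := pvFF payload seq s) (by norm_num; omega)
    norm_num at this; exact this
  have : PySem.Int.band ((payload.foldl pvFb (pvFb s seq) : Nat) : Int) 65535
      = ((pvFF payload seq s : Nat) : Int) := by
    have h65535 : (65535 : Int) = ((65535 : Nat) : Int) := by norm_num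
    rw [h65535, PySem.Int.band_natCast]
    simp only [pvFF] at hand ⊢
    rw [hand]
  rw [this]
  rcases Decidable.em (((pvFF payload seq s : Nat) : Int) = target_crc) with h | h <;> simp [h]

-- ===== VERDICT (by name: the statement is the Claim_ definition above) =====
set_option maxHeartbeats 1000000 in
theorem find_handshake_seed_spec : Claim_equal_find_handshake_seed := by
  intro payload seq target_crc _
  unfold Spec_find_handshake_seed find_handshake_seed find_handshake_seed_alt
  by_cases h : 0 ≤ target_crc ∧ target_crc ≤ 65535
  · rw [if_pos h]
    have ht : target_crc.toNat < 65536 := by omega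
    set t := target_crc.toNat with htdef
    have hBval : pvBByte (payload.reverse.foldl pvBByte target_crc) seq
        = ((pvGG payload seq t : Nat) : Int) := by
      have hcast : target_crc = ((t : Nat) : Int) := by omega
      rw [hcast, pvFoldB_eq _ t ht, pvBByte_eq _ (pvFoldG_lt _ t ht) seq]
      rfl
    rw [hBval]
    set w := pvGG payload seq t with hwdef
    have hwlt : w < 65536 := pvGG_lt payload seq t ht
    apply pvFindUnique
    · exact PySem.List.mem_pyRange_one.mpr
        ⟨by exact_mod_cast Nat.zero_le w, by exact_mod_cast hwlt⟩
    · rw [pvPredChar payload seq target_crc w hwlt]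
      rw [hwdef, pvFF_pvGG payload seq t ht]
      simp only [decide_eq_true_eq]
      omega
    · intro x hx hp
      have hxr := PySem.List.mem_pyRange_one.mp hx
      have hx0 : 0 ≤ x := hxr.1
      have hxlt : x.toNat < 65536 := by omega
      have hxcast : x = ((x.toNat : Nat) : Int) := by omega
      rw [hxcast, pvPredChar payload seq target_crc x.toNat hxlt] at hp
      have : ((pvFF payload seq x.toNat : Nat) : Int) = target_crc := of_decide_eq_true hp
      have hFt : pvFF payload seq x.toNat = t := by omega
      have := pvGG_pvFF payload seq x.toNat hxlt
      rw [hFt] at this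
      rw [hxcast, ← this]
  · rw [if_neg h]
    rw [List.find?_eq_none]
    intro x hx
    have hxr := PySem.List.mem_pyRange_one.mp hx
    have hxlt : x.toNat < 65536 := by omega
    have hxcast : x = ((x.toNat : Nat) : Int) := by omega
    rw [hxcast, pvPredChar payload seq target_crc x.toNat hxlt]
    have := pvFF_lt payload seq x.toNat hxlt
    simp only [decide_eq_true_eq]
    omega
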